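-- pv_equiv track=rewrite | github.com/mobilemutex/ghidra_scripts | BaseAddressDetector.py | cluster_addresses
-- ===== SOURCE A (Python) =====
-- def cluster_addresses(addresses, file_size):
--     """Cluster addresses by proximity"""
--     if not addresses:
--         return []
--
--     # Sort addresses
--     sorted_addresses = sorted(set(addresses))
--
--     # Determine cluster range based on file size
--     cluster_range = max(file_size, 0x10000)
--
--     clusters = []
--     current_cluster = [sorted_addresses[0]]
--
--     for addr in sorted_addresses[1:]:
--         if addr - current_cluster[-1] <= cluster_range:
--             current_cluster.append(addr)
--         else:
--             if len(current_cluster) >= 3:  # Minimum cluster size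
--                 clusters.append(current_cluster)
--             current_cluster = [addr]
--
--     # Add the last cluster
--     if len(current_cluster) >= 3:
--         clusters.append(current_cluster)
--
--     return clusters
-- ===== SOURCE B (Python) =====
-- def cluster_addresses(addresses, file_size):
--     """Cluster addresses by proximity: partition into maximal gap-bounded
--     segments, then filter by minimum size."""
--     if not addresses:
--         return []
--     s = sorted(set(addresses))
--     cluster_range = max(file_size, 0x10000)
--     segments = []
--     rest = s
--     while rest:
--         i = 1
--         while i < len(rest) and rest[i] - rest[i - 1] <= cluster_range:
--             i += 1
--         segments.append(rest[:i])
--         rest = rest[i:]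
--     return [seg for seg in segments if len(seg) >= 3]
-- ===== Notes on version B (the rewrite author's own statement) =====
-- stated objective: alternative
-- what changed: B first partitions the sorted deduplicated addresses into maximal gap-bounded segments (peeling one whole segment per outer step) and only then filters all segments by length >= 3 uniformly, instead of A's single element-by-element accumulator loop that interleaves cluster building with the size check.
import Mathlib
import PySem

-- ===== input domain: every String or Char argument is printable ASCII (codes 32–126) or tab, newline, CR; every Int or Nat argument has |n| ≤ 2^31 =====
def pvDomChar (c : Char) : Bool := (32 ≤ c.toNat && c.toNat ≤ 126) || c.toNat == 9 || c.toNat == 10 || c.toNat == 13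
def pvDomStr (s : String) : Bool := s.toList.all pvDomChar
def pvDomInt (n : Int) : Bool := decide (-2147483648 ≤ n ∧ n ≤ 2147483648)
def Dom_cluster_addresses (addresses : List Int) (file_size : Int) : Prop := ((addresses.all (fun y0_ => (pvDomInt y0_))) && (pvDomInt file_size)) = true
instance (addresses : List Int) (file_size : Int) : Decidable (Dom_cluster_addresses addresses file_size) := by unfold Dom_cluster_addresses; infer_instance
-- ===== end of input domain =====

-- B restructures A's accumulator loop as partition-into-maximal-segments followed by a uniform length filter (objective: alternative decomposition, same cost).

-- ===== PORT A =====
-- A's for-loop over sorted_addresses[1:] with state (clusters, current_cluster).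
def clusterLoopA (cr : Int) (clusters : List (List Int)) (current : List Int) : List Int → List (List Int)
  | [] => if 3 ≤ current.length then clusters ++ [current] else clusters
  | a :: rest =>
      if a - current.getLast! ≤ cr then
        clusterLoopA cr clusters (current ++ [a]) rest
      else
        clusterLoopA cr (if 3 ≤ current.length then clusters ++ [current] else clusters) [a] rest

def cluster_addresses (addresses : List Int) (file_size : Int) : List (List Int) :=
  if addresses = [] then []
  else
    let sorted_addresses := PySem.List.sorted (PySem.Set.ofList addresses) (fun x => x) false
    let cluster_range := max file_size 65536
    match sorted_addresses with
    | [] => []  -- unreachable: addresses ≠ [] makes sorted_addresses nonempty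
    | h :: t => clusterLoopA cluster_range [] [h] t

-- ===== PORT B =====
-- inner while loop of B: splits off the maximal prefix chained to prev by gaps ≤ cr
def chainB (cr prev : Int) : List Int → List Int × List Int
  | [] => ([], [])
  | a :: rest =>
      if a - prev ≤ cr then
        (a :: (chainB cr a rest).1, (chainB cr a rest).2)
      else
        ([], a :: rest)

theorem chainB_snd_le (cr prev : Int) (l : List Int) : (chainB cr prev l).2.length ≤ l.length := by
  induction l generalizing prev with
  | nil => simp [chainB]
  | cons a rest ih =>
      simp only [chainB]
      split
      · exact (ih a).trans (Nat.le_succ _)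
      · simp

-- outer while loop of B: peel one maximal segment per step
def segsB (cr : Int) : List Int → List (List Int)
  | [] => []
  | h :: t => (h :: (chainB cr h t).1) :: segsB cr (chainB cr h t).2
termination_by l => l.length
decreasing_by exact Nat.lt_succ_of_le (chainB_snd_le cr h t)

def cluster_addresses_alt (addresses : List Int) (file_size : Int) : List (List Int) :=
  if addresses = [] then []
  else
    let s := PySem.List.sorted (PySem.Set.ofList addresses) (fun x => x) false
    let cluster_range := max file_size 65536
    (segsB cluster_range s).filter (fun seg => decide (3 ≤ seg.length))

-- ===== PRECONDITION & SPEC =====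
def Spec_cluster_addresses (addresses : List Int) (file_size : Int) (out : List (List Int)) : Prop := out = cluster_addresses_alt addresses file_size
instance (addresses : List Int) (file_size : Int) (out : List (List Int)) : Decidable (Spec_cluster_addresses addresses file_size out) := by unfold Spec_cluster_addresses; infer_instance

-- ===== CLAIM (what is proved, stated in full; the proofs are below) =====
def Claim_equal_cluster_addresses : Prop := ∀ (addresses : List Int) (file_size : Int), Dom_cluster_addresses addresses file_size → Spec_cluster_addresses addresses file_size (cluster_addresses addresses file_size)

-- ===== LEMMAS AND PROOFS =====
theorem loop_eq (cr : Int) (rest : List Int) :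
    ∀ (clusters : List (List Int)) (current : List Int),
      clusterLoopA cr clusters current rest
        = clusters ++
            ((current ++ (chainB cr current.getLast! rest).1)
              :: segsB cr (chainB cr current.getLast! rest).2).filter
              (fun seg => decide (3 ≤ seg.length)) := by
  induction rest with
  | nil =>
      intro clusters current
      simp only [clusterLoopA, chainB, segsB, List.append_nil]
      by_cases hc : 3 ≤ current.length <;> simp [hc]
  | cons a t ih =>
      intro clusters current
      simp only [clusterLoopA, chainB]
      split <;> rename_i h
      · rw [ih clusters (current ++ [a])]
        simp
      · rw [ih _ [a]]
        simp only [List.getLast!]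
        conv_rhs => rw [segsB.eq_def]
        by_cases hc : 3 ≤ current.length <;>
          simp [hc, List.filter_cons]

-- ===== VERDICT (by name: the statement is the Claim_ definition above) =====
theorem cluster_addresses_spec : Claim_equal_cluster_addresses := by
  intro addresses file_size _
  unfold Spec_cluster_addresses cluster_addresses cluster_addresses_alt
  split
  · rfl
  · cases h : PySem.List.sorted (PySem.Set.ofList addresses) (fun x => x) false with
    | nil => simp [segsB.eq_def]
    | cons hd tl =>
        simp only []
        rw [loop_eq]
        conv_rhs => rw [segsB.eq_def]
        simp [List.getLast!]
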